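-- pv_equiv track=rewrite | github.com/masa08/leetcode | explore/data_structures/graph/graph_traversal_comparison.py | dfs_with_trace
-- ===== SOURCE A (Python) =====
-- from typing import List, Dict, Tuple
--
-- def dfs_with_trace(
--     graph: Dict[int, List[int]],
--     start: int,
--     visited: set = None,
--     depth: int = 0,
--     trace: List[Tuple[int, int]] = None
-- ) -> List[Tuple[int, int]]:
--     """
--     DFSの探索順序をトレース
--
--     Returns:
--         [(ノード, 深さ), ...] のリスト
--     """
--     if visited is None:
--         visited = set()
--     if trace is None:
--         trace = []
--
--     visited.add(start)
--     trace.append((start, depth))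
--
--     for neighbor in sorted(graph.get(start, [])):
--         if neighbor not in visited:
--             dfs_with_trace(graph, neighbor, visited, depth + 1, trace)
--
--     return trace
-- ===== SOURCE B (Python) =====
-- # Iterative DFS with an explicit (node, depth) stack instead of recursion; same
-- # in-place mutation of visited/trace as the original, same return value.
-- def dfs_with_trace(graph, start, visited=None, depth=0, trace=None):
--     if visited is None:
--         visited = set()
--     if trace is None:
--         trace = []
--     visited.add(start)
--     trace.append((start, depth))
--     stack = [(n, depth + 1) for n in sorted(graph.get(start, []), reverse=True)]
--     while stack:
--         node, d = stack.pop()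
--         if node in visited:
--             continue
--         visited.add(node)
--         trace.append((node, d))
--         stack.extend((n, d + 1) for n in sorted(graph.get(node, []), reverse=True))
--     return trace
-- ===== Notes on version B (the rewrite author's own statement) =====
-- stated objective: alternative
-- what changed: Replaced the recursive DFS by an iterative DFS over an explicit (node, depth) stack with mark-on-pop and reverse-sorted pushes, producing the same preorder trace and the same in-place mutations without recursion.
import Mathlib
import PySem

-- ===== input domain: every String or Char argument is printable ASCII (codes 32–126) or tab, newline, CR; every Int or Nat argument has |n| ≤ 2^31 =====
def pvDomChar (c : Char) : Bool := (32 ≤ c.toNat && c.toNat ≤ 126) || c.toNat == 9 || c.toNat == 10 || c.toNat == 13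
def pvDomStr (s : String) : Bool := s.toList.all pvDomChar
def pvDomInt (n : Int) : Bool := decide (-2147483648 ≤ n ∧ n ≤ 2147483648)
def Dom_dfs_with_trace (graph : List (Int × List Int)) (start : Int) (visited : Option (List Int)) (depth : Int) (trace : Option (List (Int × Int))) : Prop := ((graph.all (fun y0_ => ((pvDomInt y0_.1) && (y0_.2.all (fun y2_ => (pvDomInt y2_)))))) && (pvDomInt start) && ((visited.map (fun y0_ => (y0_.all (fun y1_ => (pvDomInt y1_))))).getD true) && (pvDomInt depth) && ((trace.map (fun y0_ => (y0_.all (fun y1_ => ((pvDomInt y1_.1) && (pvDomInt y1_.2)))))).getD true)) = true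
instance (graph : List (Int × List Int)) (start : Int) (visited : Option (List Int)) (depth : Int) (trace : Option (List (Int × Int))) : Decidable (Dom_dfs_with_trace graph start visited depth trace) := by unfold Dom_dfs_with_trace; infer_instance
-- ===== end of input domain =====

-- B replaces A's recursion by an iterative DFS over an explicit (node, depth) stack; same preorder
-- trace; in Python both mutate the caller's visited set and trace list identically — the theorems
-- below are about the RETURN value.

-- sorted(graph.get(n, [])) — the same expression occurs in both Pythons
def pvNbrs (graph : List (Int × List Int)) (n : Int) : List Int :=
  PySem.List.sorted (PySem.Dict.getD (PySem.Dict.mk graph) n []) (fun x => x) false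

-- all ints occurring as neighbours in the graph (used only for the termination bound)
def pvUniv (graph : List (Int × List Int)) : Finset Int :=
  (graph.flatMap (fun p => p.2)).toFinset

theorem pvNbrs_mem_univ (graph : List (Int × List Int)) (n : Int) :
    ∀ c ∈ pvNbrs graph n, c ∈ pvUniv graph := by
  intro c hc
  rw [pvNbrs, PySem.List.mem_sorted] at hc
  rw [PySem.Dict.getD_eq_get?_getD] at hc
  rcases hg : (PySem.Dict.mk graph).get? n with _ | l
  · simp [hg] at hc
  · rw [hg] at hc
    simp only [Option.getD_some] at hc
    induction graph with
    | nil => simp [PySem.Dict.get?] at hg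
    | cons p rest ih =>
      rw [PySem.Dict.get?_mk_cons] at hg
      by_cases h : p.1 == n
      · simp only [h, if_pos] at hg
        cases hg
        simp only [pvUniv, List.mem_toFinset, List.flatMap_cons, List.mem_append]
        exact Or.inl hc
      · simp only [h, Bool.false_eq_true, if_false] at hg
        have := ih hg
        simp only [pvUniv, List.mem_toFinset, List.flatMap_cons, List.mem_append] at this ⊢
        exact Or.inr this

theorem pvSetAdd_toFinset (v : PySem.Set Int) (c : Int) :
    (PySem.Set.add v c).toFinset = insert c v.toFinset := by
  by_cases h : c ∈ v
  · simp [PySem.Set.add, h, Finset.insert_eq_self.2 (List.mem_toFinset.2 h)]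
  · simp [PySem.Set.add, h, List.toFinset_append]

theorem pvCard_add_lt (univ : Finset Int) (v : PySem.Set Int) (c : Int)
    (hcu : c ∈ univ) (hc : c ∉ v) :
    (univ \ (PySem.Set.add v c).toFinset).card < (univ \ v.toFinset).card := by
  apply Finset.card_lt_card
  rw [pvSetAdd_toFinset]
  constructor
  · exact Finset.sdiff_subset_sdiff (Finset.Subset.refl _) (Finset.subset_insert _ _)
  · intro hsub
    have hmem : c ∈ univ \ v.toFinset := by
      simp [Finset.mem_sdiff, hcu, List.mem_toFinset, hc]
    have := hsub hmem
    simp [Finset.mem_sdiff] at this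

-- ===== PORT A =====
-- A's recursive call `dfs_with_trace(graph, neighbor, visited, depth+1, trace)` is inlined as the
-- else-branch of the loop over the sorted neighbours; the subset hypothesis/result components
-- carry only termination information, the computed pair is exactly A's (visited, trace).
def dfsA (graph : List (Int × List Int)) :
    (cs : List Int) → (d : Int) → (v : PySem.Set Int) → (t : List (Int × Int)) →
    (hcs : ∀ c ∈ cs, c ∈ pvUniv graph) →
    {p : PySem.Set Int × List (Int × Int) // ∀ x ∈ v, x ∈ p.1}
  | [], _, v, t, _ => ⟨(v, t), fun _ hx => hx⟩
  | c :: cs, d, v, t, h =>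
    if hc : c ∈ v then
      dfsA graph cs d v t (fun x hx => h x (List.mem_cons_of_mem _ hx))
    else
      let r1 := dfsA graph (pvNbrs graph c) (d + 1) (PySem.Set.add v c) (t ++ [(c, d)])
        (pvNbrs_mem_univ graph c)
      let r2 := dfsA graph cs d r1.1.1 r1.1.2 (fun x hx => h x (List.mem_cons_of_mem _ hx))
      ⟨r2.1, fun x hx => r2.2 x (r1.2 x (by rw [PySem.Set.mem_add]; exact Or.inl hx))⟩
  termination_by cs d v t _ => ((pvUniv graph \ v.toFinset).card, cs.length)
  decreasing_by
  · exact Prod.Lex.right _ (by simp)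
  · exact Prod.Lex.left _ _ (pvCard_add_lt _ _ _ (h c List.mem_cons_self) hc)
  · have hsub : v.toFinset ⊆ r1.1.1.toFinset := fun x hx =>
      List.mem_toFinset.2 (r1.2 x (by rw [PySem.Set.mem_add]; exact Or.inl (List.mem_toFinset.1 hx)))
    have hle := Finset.card_le_card (Finset.sdiff_subset_sdiff (Finset.Subset.refl (pvUniv graph)) hsub)
    rcases lt_or_eq_of_le hle with hlt | heq
    · exact Prod.Lex.left _ _ hlt
    · rw [heq]; exact Prod.Lex.right _ (by simp)

def dfs_with_trace (graph : List (Int × List Int)) (start : Int) (visited : Option (List Int)) (depth : Int) (trace : Option (List (Int × Int))) : List (Int × Int) :=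
  let v0 : PySem.Set Int := match visited with
    | none => PySem.Set.empty
    | some l => PySem.Set.ofList l
  let t0 : List (Int × Int) := match trace with
    | none => []
    | some l => l
  -- visited.add(start); trace.append((start, depth)); for neighbor in sorted(...): if …: recurse
  (dfsA graph (pvNbrs graph start) (depth + 1) (PySem.Set.add v0 start)
    (t0 ++ [(start, depth)]) (pvNbrs_mem_univ graph start)).1.2

-- ===== PORT B =====
-- the explicit stack, top at the list HEAD (Python keeps the top at the list's END: it pushes the
-- reverse-sorted neighbours at the end and pops from the end — i.e. the ascending list prepended here)
def loopB (graph : List (Int × List Int)) :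
    (stack : List (Int × Int)) → (v : PySem.Set Int) → (t : List (Int × Int)) →
    (hs : ∀ p ∈ stack, p.1 ∈ pvUniv graph) → List (Int × Int)
  | [], _, t, _ => t
  | (n, d) :: rest, v, t, h =>
    if hn : n ∈ v then
      loopB graph rest v t (fun p hp => h p (List.mem_cons_of_mem _ hp))
    else
      loopB graph (((pvNbrs graph n).map (fun c => (c, d + 1))) ++ rest)
        (PySem.Set.add v n) (t ++ [(n, d)])
        (by
          intro p hp
          rcases List.mem_append.1 hp with hp | hp
          · rcases List.mem_map.1 hp with ⟨c, hc, rfl⟩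
            exact pvNbrs_mem_univ graph n c hc
          · exact h p (List.mem_cons_of_mem _ hp))
  termination_by stack v t _ => ((pvUniv graph \ v.toFinset).card, stack.length)
  decreasing_by
  · exact Prod.Lex.right _ (by simp)
  · exact Prod.Lex.left _ _ (pvCard_add_lt _ _ _ (h (n, d) List.mem_cons_self) hn)

def dfs_with_trace_alt (graph : List (Int × List Int)) (start : Int) (visited : Option (List Int)) (depth : Int) (trace : Option (List (Int × Int))) : List (Int × Int) :=
  let v0 : PySem.Set Int := match visited with
    | none => PySem.Set.empty
    | some l => PySem.Set.ofList l
  let t0 : List (Int × Int) := match trace with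
    | none => []
    | some l => l
  loopB graph ((pvNbrs graph start).map (fun c => (c, depth + 1)))
    (PySem.Set.add v0 start) (t0 ++ [(start, depth)])
    (fun p hp => by
      rcases List.mem_map.1 hp with ⟨c, hc, rfl⟩
      exact pvNbrs_mem_univ graph start c hc)

-- ===== PRECONDITION & SPEC =====
def Spec_dfs_with_trace (graph : List (Int × List Int)) (start : Int) (visited : Option (List Int)) (depth : Int) (trace : Option (List (Int × Int))) (out : List (Int × Int)) : Prop := out = dfs_with_trace_alt graph start visited depth trace
instance (graph : List (Int × List Int)) (start : Int) (visited : Option (List Int)) (depth : Int) (trace : Option (List (Int × Int))) (out : List (Int × Int)) : Decidable (Spec_dfs_with_trace graph start visited depth trace out) := by unfold Spec_dfs_with_trace; infer_instance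

-- ===== CLAIM (what is proved, stated in full; the proofs are below) =====
def Claim_equal_dfs_with_trace : Prop := ∀ (graph : List (Int × List Int)) (start : Int) (visited : Option (List Int)) (depth : Int) (trace : Option (List (Int × Int))), Dom_dfs_with_trace graph start visited depth trace → Spec_dfs_with_trace graph start visited depth trace (dfs_with_trace graph start visited depth trace)

-- ===== LEMMAS AND PROOFS =====

theorem loopB_congr (graph : List (Int × List Int)) (s1 s2 : List (Int × Int))
    (v : PySem.Set Int) (t : List (Int × Int)) (h1 : ∀ p ∈ s1, p.1 ∈ pvUniv graph)
    (h2 : ∀ p ∈ s2, p.1 ∈ pvUniv graph) (hs : s1 = s2) :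
    loopB graph s1 v t h1 = loopB graph s2 v t h2 := by subst hs; rfl

-- popping B's stack through the block of nodes `cs` (all at depth d) computes exactly A's
-- recursive fold over cs, then continues with the rest of the stack
theorem loopB_eq_dfsA (graph : List (Int × List Int)) :
    ∀ (k : Nat) (cs : List Int) (d : Int) (v : PySem.Set Int) (t : List (Int × Int))
      (hcs : ∀ c ∈ cs, c ∈ pvUniv graph) (rest : List (Int × Int))
      (hall : ∀ p ∈ (cs.map (fun c => (c, d))) ++ rest, p.1 ∈ pvUniv graph)
      (hrest : ∀ p ∈ rest, p.1 ∈ pvUniv graph),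
      (pvUniv graph \ v.toFinset).card ≤ k →
      loopB graph ((cs.map (fun c => (c, d))) ++ rest) v t hall
        = loopB graph rest (dfsA graph cs d v t hcs).1.1
            (dfsA graph cs d v t hcs).1.2 hrest := by
  intro k
  induction k with
  | zero =>
    intro cs
    induction cs with
    | nil =>
      intro d v t hcs rest hall hrest hk
      rw [dfsA]
      exact loopB_congr graph _ _ v t hall hrest (by simp)
    | cons c cs ihc =>
      intro d v t hcs rest hall hrest hk
      by_cases hc : c ∈ v
      · refine Eq.trans ?_ (Eq.trans (ihc d v t (fun x hx => hcs x (List.mem_cons_of_mem _ hx)) rest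
          (fun p hp => hall p (by simpa using Or.inr (by simpa using hp))) hrest hk) ?_)
        · refine Eq.trans (loopB_congr graph _ ((c, d) :: (cs.map (fun c => (c, d)) ++ rest)) v t hall
            (fun p hp => hall p (by simpa using hp)) (by simp)) ?_
          conv_lhs => rw [loopB]
          rw [dif_pos hc]
        · conv_rhs => rw [dfsA]
          rw [dif_pos hc]
      · exfalso
        have : c ∈ pvUniv graph \ v.toFinset := by
          simp [Finset.mem_sdiff, hcs c List.mem_cons_self, hc]
        have := Finset.card_pos.2 ⟨c, this⟩
        omega
  | succ k ihk =>
    intro cs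
    induction cs with
    | nil =>
      intro d v t hcs rest hall hrest hk
      rw [dfsA]
      exact loopB_congr graph _ _ v t hall hrest (by simp)
    | cons c cs ihc =>
      intro d v t hcs rest hall hrest hk
      by_cases hc : c ∈ v
      · refine Eq.trans ?_ (Eq.trans (ihc d v t (fun x hx => hcs x (List.mem_cons_of_mem _ hx)) rest
          (fun p hp => hall p (by simpa using Or.inr (by simpa using hp))) hrest hk) ?_)
        · refine Eq.trans (loopB_congr graph _ ((c, d) :: (cs.map (fun c => (c, d)) ++ rest)) v t hall
            (fun p hp => hall p (by simpa using hp)) (by simp)) ?_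
          conv_lhs => rw [loopB]
          rw [dif_pos hc]
        · conv_rhs => rw [dfsA]
          rw [dif_pos hc]
      · -- visit c: pop it, mark it, push its neighbours; A recurses into c then continues with cs
        have hcu : c ∈ pvUniv graph := hcs c List.mem_cons_self
        have hlt := pvCard_add_lt (pvUniv graph) v c hcu hc
        have hcs' : ∀ x ∈ cs, x ∈ pvUniv graph := fun x hx => hcs x (List.mem_cons_of_mem _ hx)
        have hall2 : ∀ p ∈ (cs.map (fun c => (c, d))) ++ rest, p.1 ∈ pvUniv graph :=
          fun p hp => hall p (by simpa using Or.inr (by simpa using hp))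
        -- step 1: pop (c,d)
        have step0 : loopB graph ((c :: cs).map (fun c => (c, d)) ++ rest) v t hall
            = loopB graph (((pvNbrs graph c).map (fun x => (x, d + 1))) ++ ((cs.map (fun c => (c, d))) ++ rest))
                (PySem.Set.add v c) (t ++ [(c, d)])
                (by
                  intro p hp
                  rcases List.mem_append.1 hp with hp | hp
                  · rcases List.mem_map.1 hp with ⟨x, hx, rfl⟩
                    exact pvNbrs_mem_univ graph c x hx
                  · exact hall2 p hp) := by
          refine Eq.trans (loopB_congr graph _ ((c, d) :: (cs.map (fun c => (c, d)) ++ rest)) v t hall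
            (fun p hp => hall p (by simpa using hp)) (by simp)) ?_
          conv_lhs => rw [loopB]
          rw [dif_neg hc]
        -- step 2: the neighbour block of c computes A's recursive call
        have step1 := ihk (pvNbrs graph c) (d + 1) (PySem.Set.add v c) (t ++ [(c, d)])
          (pvNbrs_mem_univ graph c) ((cs.map (fun c => (c, d))) ++ rest)
          (by
            intro p hp
            rcases List.mem_append.1 hp with hp | hp
            · rcases List.mem_map.1 hp with ⟨x, hx, rfl⟩
              exact pvNbrs_mem_univ graph c x hx
            · exact hall2 p hp)
          hall2 (by omega)
        -- step 3: the cs block continues from the state A's recursive call returned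
        have hsub : ∀ x ∈ PySem.Set.add v c,
            x ∈ (dfsA graph (pvNbrs graph c) (d + 1) (PySem.Set.add v c) (t ++ [(c, d)])
              (pvNbrs_mem_univ graph c)).1.1 :=
          (dfsA graph (pvNbrs graph c) (d + 1) (PySem.Set.add v c) (t ++ [(c, d)])
              (pvNbrs_mem_univ graph c)).2
        have hk2 : (pvUniv graph \ (dfsA graph (pvNbrs graph c) (d + 1) (PySem.Set.add v c)
            (t ++ [(c, d)]) (pvNbrs_mem_univ graph c)).1.1.toFinset).card ≤ k := by
          have hsubF : (PySem.Set.add v c).toFinset ⊆ (dfsA graph (pvNbrs graph c) (d + 1)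
              (PySem.Set.add v c) (t ++ [(c, d)]) (pvNbrs_mem_univ graph c)).1.1.toFinset := by
            intro x hx
            exact List.mem_toFinset.2 (hsub x (List.mem_toFinset.1 hx))
          have := Finset.card_le_card (Finset.sdiff_subset_sdiff (Finset.Subset.refl (pvUniv graph)) hsubF)
          omega
        have step2 := ihk cs d
          (dfsA graph (pvNbrs graph c) (d + 1) (PySem.Set.add v c) (t ++ [(c, d)])
            (pvNbrs_mem_univ graph c)).1.1
          (dfsA graph (pvNbrs graph c) (d + 1) (PySem.Set.add v c) (t ++ [(c, d)])
            (pvNbrs_mem_univ graph c)).1.2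
          hcs' rest hall2 hrest hk2
        -- assemble and fold A's equation
        refine Eq.trans step0 (Eq.trans step1 (Eq.trans step2 ?_))
        conv_rhs => rw [dfsA]
        rw [dif_neg hc]



theorem loopB_nil (graph : List (Int × List Int)) (v : PySem.Set Int) (t : List (Int × Int))
    (h : ∀ p ∈ ([] : List (Int × Int)), p.1 ∈ pvUniv graph) : loopB graph [] v t h = t := by
  rw [loopB]

theorem top_eq (graph : List (Int × List Int)) (start : Int) (v0 : PySem.Set Int) (depth : Int)
    (t0 : List (Int × Int)) (hp : ∀ p ∈ (pvNbrs graph start).map (fun c => (c, depth + 1)), p.1 ∈ pvUniv graph) :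
    (dfsA graph (pvNbrs graph start) (depth + 1) (PySem.Set.add v0 start)
      (t0 ++ [(start, depth)]) (pvNbrs_mem_univ graph start)).1.2
    = loopB graph ((pvNbrs graph start).map (fun c => (c, depth + 1)))
        (PySem.Set.add v0 start) (t0 ++ [(start, depth)]) hp := by
  have main := loopB_eq_dfsA graph ((pvUniv graph \ (PySem.Set.add v0 start).toFinset).card)
    (pvNbrs graph start) (depth + 1) (PySem.Set.add v0 start) (t0 ++ [(start, depth)])
    (pvNbrs_mem_univ graph start) []
    (by
      intro p hp'
      rcases List.mem_append.1 hp' with hp' | hp'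
      · rcases List.mem_map.1 hp' with ⟨x, hx, rfl⟩
        exact pvNbrs_mem_univ graph start x hx
      · simp at hp')
    (by intro p hp'; simp at hp') (le_refl _)
  rw [loopB_nil] at main
  refine Eq.trans main.symm (loopB_congr graph _ _ _ _ _ hp (by simp))

-- ===== VERDICT (by name: the statement is the Claim_ definition above) =====
theorem dfs_with_trace_spec : Claim_equal_dfs_with_trace := by
  intro graph start visited depth trace _
  unfold Spec_dfs_with_trace
  cases visited <;> cases trace <;>
    (simp only [dfs_with_trace, dfs_with_trace_alt]; exact top_eq _ _ _ _ _ _)
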